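-- pv_equiv track=rewrite | github.com/Yudaeun/ReadyForCodingTest | 프로그래머스/lv0/120956. 옹알이 （1）/옹알이 （1）.py | solution
-- ===== SOURCE A (Python) =====
-- from itertools import permutations
--
-- def solution(babbling):
--     answer = 0
--     babblingList=[]
--     ba=['aya','ye','woo','ma']
--     result=[]
--     for i in range(1,5):
--         for permu in permutations(ba,i):
--             babblingList.append(permu)
--     for i in range(len(babblingList)):
--         result.append(''.join(babblingList[i]))
--     for babb in babbling:
--         if babb in result:
--             answer+=1
--     return answer
-- ===== SOURCE B (Python) =====
-- def solution(babbling):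
--     words = ('aya', 'ye', 'woo', 'ma')
--
--     def ok(s):
--         used = set()
--         i = 0
--         while i < len(s):
--             for w in words:
--                 if w not in used and s.startswith(w, i):
--                     used.add(w)
--                     i += len(w)
--                     break
--             else:
--                 return False
--         return bool(used)
--
--     return sum(1 for s in babbling if ok(s))
-- ===== Notes on version B (the rewrite author's own statement) =====
-- stated objective: simpler
-- what changed: A precomputes all 64 concatenations of 1-4 distinct words via itertools.permutations and tests list membership; B greedily parses each string left-to-right, consuming each of 'aya','ye','woo','ma' at most once and accepting iff the whole string is consumed and at least one word was used.
import Mathlib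
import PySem

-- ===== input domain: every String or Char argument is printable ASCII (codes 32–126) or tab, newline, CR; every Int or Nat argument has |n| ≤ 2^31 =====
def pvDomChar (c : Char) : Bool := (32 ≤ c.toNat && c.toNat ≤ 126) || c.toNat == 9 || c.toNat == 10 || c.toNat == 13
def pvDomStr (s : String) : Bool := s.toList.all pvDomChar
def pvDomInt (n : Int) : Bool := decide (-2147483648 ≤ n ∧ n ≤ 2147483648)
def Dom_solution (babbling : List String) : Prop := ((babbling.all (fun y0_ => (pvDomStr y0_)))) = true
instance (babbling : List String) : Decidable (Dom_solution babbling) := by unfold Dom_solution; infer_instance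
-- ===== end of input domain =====

-- B replaces A's enumeration of all 64 distinct-word permutation concatenations by a greedy
-- left-to-right parser per string (alternative decomposition; no asymptotic speed claim).

-- ===== PORT A =====
-- itertools.permutations(pool, r), in itertools' emission order
def permsA : Nat → List String → List (List String)
  | 0, _ => [[]]
  | r + 1, l =>
    (List.range l.length).flatMap
      (fun i => (permsA r (l.eraseIdx i)).map (fun t => l.getD i "" :: t))

def baA : List String := ["aya", "ye", "woo", "ma"]

-- for i in range(1,5): for permu in permutations(ba,i): babblingList.append(permu)
def babblingListA : List (List String) :=
  (List.range' 1 4).flatMap (fun i => permsA i baA)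

-- for i in range(len(babblingList)): result.append(''.join(babblingList[i]))
def resultA : List String :=
  (List.range babblingListA.length).map (fun i => String.join (babblingListA.getD i []))

def solution (babbling : List String) : Int :=
  babbling.foldl (fun answer babb => if babb ∈ resultA then answer + 1 else answer) 0

-- ===== PORT B =====
-- the greedy parser of Source B: the index i becomes the remaining character list, the `used`
-- set becomes four availability flags (a y w m, in Source B's word order); the final
-- `return bool(used)` is `!(a && y && w && m)` (at least one word was consumed).
def parseB : List Char → Bool → Bool → Bool → Bool → Bool
  | [], a, y, w, m => !(a && y && w && m)
  | c :: cs, a, y, w, m =>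
    if a && List.isPrefixOf ['a','y','a'] (c :: cs) then parseB ((c :: cs).drop 3) false y w m
    else if y && List.isPrefixOf ['y','e'] (c :: cs) then parseB ((c :: cs).drop 2) a false w m
    else if w && List.isPrefixOf ['w','o','o'] (c :: cs) then parseB ((c :: cs).drop 3) a y false m
    else if m && List.isPrefixOf ['m','a'] (c :: cs) then parseB ((c :: cs).drop 2) a y w false
    else false
termination_by cs _ _ _ _ => cs.length
decreasing_by all_goals simp

def okB (s : String) : Bool := parseB s.toList true true true true

def solution_alt (babbling : List String) : Int :=
  babbling.foldl (fun acc s => if okB s then acc + 1 else acc) 0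

-- ===== PRECONDITION & SPEC =====
def Spec_solution (babbling : List String) (out : Int) : Prop := out = solution_alt babbling
instance (babbling : List String) (out : Int) : Decidable (Spec_solution babbling out) := by unfold Spec_solution; infer_instance

-- ===== CLAIM (what is proved, stated in full; the proofs are below) =====
def Claim_equal_solution : Prop := ∀ (babbling : List String), Dom_solution babbling → Spec_solution babbling (solution babbling)

-- ===== LEMMAS AND PROOFS =====

-- the language accepted by parseB from each flag state, as a literal table
def joins : Bool → Bool → Bool → Bool → List (List Char)
  | true, true, true, true => [['a','y','a'], ['a','y','a','y','e'], ['a','y','a','y','e','w','o','o'], ['a','y','a','y','e','w','o','o','m','a'], ['a','y','a','y','e','m','a'], ['a','y','a','y','e','m','a','w','o','o'], ['a','y','a','w','o','o'], ['a','y','a','w','o','o','y','e'], ['a','y','a','w','o','o','y','e','m','a'], ['a','y','a','w','o','o','m','a'], ['a','y','a','w','o','o','m','a','y','e'], ['a','y','a','m','a'], ['a','y','a','m','a','y','e'], ['a','y','a','m','a','y','e','w','o','o'], ['a','y','a','m','a','w','o','o'], ['a','y','a','m','a','w','o','o','y','e'], ['y','e'], ['y','e','a','y','a'], ['y','e','a','y','a','w','o','o'],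 ['y','e','a','y','a','w','o','o','m','a'], ['y','e','a','y','a','m','a'], ['y','e','a','y','a','m','a','w','o','o'], ['y','e','w','o','o'], ['y','e','w','o','o','a','y','a'], ['y','e','w','o','o','a','y','a','m','a'], ['y','e','w','o','o','m','a'], ['y','e','w','o','o','m','a','a','y','a'], ['y','e','m','a'], ['y','e','m','a','a','y','a'], ['y','e','m','a','a','y','a','w','o','o'], ['y','e','m','a','w','o','o'], ['y','e','m','a','w','o','o','a','y','a'], ['w','o','o'], ['w','o','o','a','y','a'], ['w','o','o','a','y','a','y','e'], ['w','o','o','a','y','a','y','e','m','a'], ['w','o','o','a','y','a','m','a'], ['w','o','o','a','y','a','m','a','y','e'], ['w','o','o','y','e'], ['w','o','o','y','e','a','y','a'], ['w','o','o','y','e','a','y','a','m','a'], ['w','o','o','y','e','m','a'], ['w','o','o','y','e','m','a','a','y','a'], ['w','o','o','m','a'], ['w','o','o','m','a','a','y','a'], ['w','o','o','m','a','a','y','a','y','e'], ['w','o','o','m','a','y','e'], ['w','o','o','m','a','y','e','a','y','a'], ['m','a'], ['m','a','a','y','a'], ['m','a','a','y','a','y','e'], ['m','a','a','y','a','y','e','w','o','o'],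 ['m','a','a','y','a','w','o','o'], ['m','a','a','y','a','w','o','o','y','e'], ['m','a','y','e'], ['m','a','y','e','a','y','a'], ['m','a','y','e','a','y','a','w','o','o'], ['m','a','y','e','w','o','o'], ['m','a','y','e','w','o','o','a','y','a'], ['m','a','w','o','o'], ['m','a','w','o','o','a','y','a'], ['m','a','w','o','o','a','y','a','y','e'], ['m','a','w','o','o','y','e'], ['m','a','w','o','o','y','e','a','y','a']]
  | true, true, true, false => [[], ['a','y','a'], ['a','y','a','y','e'], ['a','y','a','y','e','w','o','o'], ['a','y','a','w','o','o'], ['a','y','a','w','o','o','y','e'], ['y','e'], ['y','e','a','y','a'], ['y','e','a','y','a','w','o','o'], ['y','e','w','o','o'], ['y','e','w','o','o','a','y','a'], ['w','o','o'], ['w','o','o','a','y','a'], ['w','o','o','a','y','a','y','e'], ['w','o','o','y','e'], ['w','o','o','y','e','a','y','a']]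
  | true, true, false, true => [[], ['a','y','a'], ['a','y','a','y','e'], ['a','y','a','y','e','m','a'], ['a','y','a','m','a'], ['a','y','a','m','a','y','e'], ['y','e'], ['y','e','a','y','a'], ['y','e','a','y','a','m','a'], ['y','e','m','a'], ['y','e','m','a','a','y','a'], ['m','a'], ['m','a','a','y','a'], ['m','a','a','y','a','y','e'], ['m','a','y','e'], ['m','a','y','e','a','y','a']]
  | true, true, false, false => [[], ['a','y','a'], ['a','y','a','y','e'], ['y','e'], ['y','e','a','y','a']]
  | true, false, true, true => [[], ['a','y','a'], ['a','y','a','w','o','o'], ['a','y','a','w','o','o','m','a'], ['a','y','a','m','a'], ['a','y','a','m','a','w','o','o'], ['w','o','o'], ['w','o','o','a','y','a'], ['w','o','o','a','y','a','m','a'], ['w','o','o','m','a'], ['w','o','o','m','a','a','y','a'], ['m','a'], ['m','a','a','y','a'], ['m','a','a','y','a','w','o','o'], ['m','a','w','o','o'], ['m','a','w','o','o','a','y','a']]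
  | true, false, true, false => [[], ['a','y','a'], ['a','y','a','w','o','o'], ['w','o','o'], ['w','o','o','a','y','a']]
  | true, false, false, true => [[], ['a','y','a'], ['a','y','a','m','a'], ['m','a'], ['m','a','a','y','a']]
  | true, false, false, false => [[], ['a','y','a']]
  | false, true, true, true => [[], ['y','e'], ['y','e','w','o','o'], ['y','e','w','o','o','m','a'], ['y','e','m','a'], ['y','e','m','a','w','o','o'], ['w','o','o'], ['w','o','o','y','e'], ['w','o','o','y','e','m','a'], ['w','o','o','m','a'], ['w','o','o','m','a','y','e'], ['m','a'], ['m','a','y','e'], ['m','a','y','e','w','o','o'], ['m','a','w','o','o'], ['m','a','w','o','o','y','e']]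
  | false, true, true, false => [[], ['y','e'], ['y','e','w','o','o'], ['w','o','o'], ['w','o','o','y','e']]
  | false, true, false, true => [[], ['y','e'], ['y','e','m','a'], ['m','a'], ['m','a','y','e']]
  | false, true, false, false => [[], ['y','e']]
  | false, false, true, true => [[], ['w','o','o'], ['w','o','o','m','a'], ['m','a'], ['m','a','w','o','o']]
  | false, false, true, false => [[], ['w','o','o']]
  | false, false, false, true => [[], ['m','a']]
  | false, false, false, false => [[]]

-- the table satisfies the recursion of parseB's branch structure
theorem joins_eq (a y w m : Bool) : joins a y w m =
    (if a && y && w && m then [] else [[]]) ++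
    (if a then (joins false y w m).map (['a','y','a'] ++ ·) else []) ++
    (if y then (joins a false w m).map (['y','e'] ++ ·) else []) ++
    (if w then (joins a y false m).map (['w','o','o'] ++ ·) else []) ++
    (if m then (joins a y w false).map (['m','a'] ++ ·) else []) := by
  cases a <;> cases y <;> cases w <;> cases m <;> decide

theorem mem_joins (cs : List Char) (a y w m : Bool) : cs ∈ joins a y w m ↔
    (cs = [] ∧ (a && y && w && m) = false) ∨
    (a = true ∧ ∃ r ∈ joins false y w m, cs = ['a','y','a'] ++ r) ∨
    (y = true ∧ ∃ r ∈ joins a false w m, cs = ['y','e'] ++ r) ∨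
    (w = true ∧ ∃ r ∈ joins a y false m, cs = ['w','o','o'] ++ r) ∨
    (m = true ∧ ∃ r ∈ joins a y w false, cs = ['m','a'] ++ r) := by
  rw [joins_eq]
  cases a <;> cases y <;> cases w <;> cases m <;>
    simp [List.mem_append, List.mem_map, eq_comm]

theorem nil_mem_joins (a y w m : Bool) : ([] ∈ joins a y w m) ↔ (a && y && w && m) = false := by
  cases a <;> cases y <;> cases w <;> cases m <;> decide

theorem parse_iff (n : Nat) : ∀ (cs : List Char) (a y w m : Bool), cs.length ≤ n →
    (parseB cs a y w m = true ↔ cs ∈ joins a y w m) := by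
  induction n with
  | zero =>
    intro cs a y w m h
    have : cs = [] := List.eq_nil_of_length_eq_zero (Nat.le_zero.mp h)
    subst this
    cases a <;> cases y <;> cases w <;> cases m <;> simp [parseB, nil_mem_joins]
  | succ n ih =>
    intro cs a y w m h
    match cs with
    | [] =>
      cases a <;> cases y <;> cases w <;> cases m <;> simp [parseB, nil_mem_joins]
    | c :: cs' =>
      simp only [parseB]
      split_ifs with h1 h2 h3 h4
      · obtain ⟨ha, hp⟩ := Bool.and_eq_true_iff.mp h1
        obtain ⟨t, ht⟩ := List.isPrefixOf_iff_prefix.mp hp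
        rw [← ht]
        have hlt : t.length ≤ n := by
          have h2 := congrArg List.length ht
          simp at h2 h ⊢; omega
        rw [show ((['a','y','a'] : List Char) ++ t).drop 3 = t by simp]
        clear ht hp h1 h
        rw [ih t false y w m hlt, mem_joins (['a','y','a'] ++ t) a y w m]
        constructor
        · intro hm; exact Or.inr (Or.inl ⟨ha, t, hm, rfl⟩)
        · rintro (⟨hnil, -⟩ | ⟨-, r, hr, heq⟩ | ⟨-, r, hr, heq⟩ | ⟨-, r, hr, heq⟩ | ⟨-, r, hr, heq⟩) <;> simp_all
      · obtain ⟨hy, hp⟩ := Bool.and_eq_true_iff.mp h2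
        obtain ⟨t, ht⟩ := List.isPrefixOf_iff_prefix.mp hp
        rw [← ht]
        have hlt : t.length ≤ n := by
          have h2 := congrArg List.length ht
          simp at h2 h ⊢; omega
        rw [show ((['y','e'] : List Char) ++ t).drop 2 = t by simp]
        clear ht hp h1 h2 h
        rw [ih t a false w m hlt, mem_joins (['y','e'] ++ t) a y w m]
        constructor
        · intro hm; exact Or.inr (Or.inr (Or.inl ⟨hy, t, hm, rfl⟩))
        · rintro (⟨hnil, -⟩ | ⟨-, r, hr, heq⟩ | ⟨-, r, hr, heq⟩ | ⟨-, r, hr, heq⟩ | ⟨-, r, hr, heq⟩) <;> simp_all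
      · obtain ⟨hw, hp⟩ := Bool.and_eq_true_iff.mp h3
        obtain ⟨t, ht⟩ := List.isPrefixOf_iff_prefix.mp hp
        rw [← ht]
        have hlt : t.length ≤ n := by
          have h2 := congrArg List.length ht
          simp at h2 h ⊢; omega
        rw [show ((['w','o','o'] : List Char) ++ t).drop 3 = t by simp]
        clear ht hp h1 h2 h3 h
        rw [ih t a y false m hlt, mem_joins (['w','o','o'] ++ t) a y w m]
        constructor
        · intro hm; exact Or.inr (Or.inr (Or.inr (Or.inl ⟨hw, t, hm, rfl⟩)))
        · rintro (⟨hnil, -⟩ | ⟨-, r, hr, heq⟩ | ⟨-, r, hr, heq⟩ | ⟨-, r, hr, heq⟩ | ⟨-, r, hr, heq⟩) <;> simp_all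
      · obtain ⟨hm', hp⟩ := Bool.and_eq_true_iff.mp h4
        obtain ⟨t, ht⟩ := List.isPrefixOf_iff_prefix.mp hp
        rw [← ht]
        have hlt : t.length ≤ n := by
          have h2 := congrArg List.length ht
          simp at h2 h ⊢; omega
        rw [show ((['m','a'] : List Char) ++ t).drop 2 = t by simp]
        clear ht hp h1 h2 h3 h4 h
        rw [ih t a y w false hlt, mem_joins (['m','a'] ++ t) a y w m]
        constructor
        · intro hm; exact Or.inr (Or.inr (Or.inr (Or.inr ⟨hm', t, hm, rfl⟩)))
        · rintro (⟨hnil, -⟩ | ⟨-, r, hr, heq⟩ | ⟨-, r, hr, heq⟩ | ⟨-, r, hr, heq⟩ | ⟨-, r, hr, heq⟩) <;> simp_all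
      · rw [mem_joins (c :: cs') a y w m]
        simp only [false_iff]
        rintro (⟨hnil, -⟩ | ⟨hf, r, hr, heq⟩ | ⟨hf, r, hr, heq⟩ | ⟨hf, r, hr, heq⟩ | ⟨hf, r, hr, heq⟩)
        · exact absurd hnil (by simp)
        · exact h1 (by rw [hf, Bool.true_and]; exact List.isPrefixOf_iff_prefix.mpr ⟨r, heq.symm⟩)
        · exact h2 (by rw [hf, Bool.true_and]; exact List.isPrefixOf_iff_prefix.mpr ⟨r, heq.symm⟩)
        · exact h3 (by rw [hf, Bool.true_and]; exact List.isPrefixOf_iff_prefix.mpr ⟨r, heq.symm⟩)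
        · exact h4 (by rw [hf, Bool.true_and]; exact List.isPrefixOf_iff_prefix.mpr ⟨r, heq.symm⟩)

set_option maxRecDepth 8192 in
theorem result_sub_joins : ∀ t ∈ resultA, t.toList ∈ joins true true true true := by decide

set_option maxRecDepth 8192 in
theorem joins_sub_result : ∀ cs ∈ joins true true true true, ∃ t ∈ resultA, t.toList = cs := by
  decide

theorem ok_iff_mem (s : String) : okB s = true ↔ s ∈ resultA := by
  unfold okB
  rw [parse_iff s.toList.length s.toList true true true true (Nat.le_refl _)]
  constructor
  · intro hc
    obtain ⟨t, htm, hts⟩ := joins_sub_result _ hc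
    exact String.toList_inj.mp hts ▸ htm
  · intro hs
    exact result_sub_joins s hs

theorem foldl_count_congr (l : List String) (p q : String → Prop)
    [DecidablePred p] [DecidablePred q]
    (h : ∀ s, p s ↔ q s) : ∀ (acc : Int),
    l.foldl (fun a s => if p s then a + 1 else a) acc =
    l.foldl (fun a s => if q s then a + 1 else a) acc := by
  induction l with
  | nil => intro acc; rfl
  | cons x xs ihl =>
    intro acc
    rw [List.foldl_cons, List.foldl_cons, if_congr (h x) rfl rfl]
    exact ihl _

-- ===== VERDICT (by name: the statement is the Claim_ definition above) =====
theorem solution_spec : Claim_equal_solution := by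
  intro babbling _
  unfold Spec_solution solution solution_alt
  exact foldl_count_congr babbling (fun b => b ∈ resultA) (fun s => okB s = true)
    (fun s => (ok_iff_mem s).symm) 0
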